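-- pv_equiv track=rewrite | github.com/johanestrada01/CNYT_LIBRERIA_1 | Funciones.py | conjugada
-- ===== SOURCE A (Python) =====
-- def conjugada(mat):
--     """
--     matriz->matriz
--     retorna la conjugada de una matriz
--     """
--     if type(mat[0])==tuple:
--         for i in range(len(mat)):
--             mat[i]=(mat[i][0],-mat[i][1])
--     else:
--         for i in range(len(mat)):
--             for j in range(len(mat[0])):
--                 mat[i][j]=(mat[i][j][0],-mat[i][j][1])
--     return mat
-- ===== SOURCE B (Python) =====
-- def conjugada(mat):
--     """
--     matriz->matriz
--     retorna la conjugada de una matriz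
--     """
--     def _conj(x):
--         if type(x) == tuple:
--             return (x[0], -x[1])
--         for i in range(len(x)):
--             x[i] = _conj(x[i])
--         return x
--     return _conj(mat)
-- ===== Notes on version B (the rewrite author's own statement) =====
-- stated objective: simpler
-- what changed: replaces the explicit vector/matrix type dispatch with nested index loops bounded by len(mat[0]) by one uniform recursion that conjugates every element of every row in place
-- intended difference: on ragged matrices whose first row is shortest, A leaves the elements of longer rows beyond column len(mat[0]) unconjugated (its inner loop is bounded by the first row's length), while B conjugates every element, which is the intended conjugate of the whole matrix. — e.g. on conjugada([[(1, 2)], [(3, 4), (5, 6)]]): A returns [[(1, -2)], [(3, -4), (5, 6)]], B returns [[(1, -2)], [(3, -4), (5, -6)]]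
import Mathlib
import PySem

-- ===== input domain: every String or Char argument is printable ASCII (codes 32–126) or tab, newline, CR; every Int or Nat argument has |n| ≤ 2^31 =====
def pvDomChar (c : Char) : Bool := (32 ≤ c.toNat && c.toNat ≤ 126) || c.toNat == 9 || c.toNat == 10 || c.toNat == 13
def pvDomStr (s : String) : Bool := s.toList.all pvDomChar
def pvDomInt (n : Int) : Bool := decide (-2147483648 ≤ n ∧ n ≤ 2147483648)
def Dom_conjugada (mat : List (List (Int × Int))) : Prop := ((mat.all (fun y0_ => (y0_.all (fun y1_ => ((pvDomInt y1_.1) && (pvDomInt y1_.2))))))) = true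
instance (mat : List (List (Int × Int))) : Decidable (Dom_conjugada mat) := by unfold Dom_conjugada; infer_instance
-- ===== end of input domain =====

-- B replaces A's type-dispatched nested index loops (inner loop bounded by len(mat[0]))
-- by one uniform recursion conjugating every element; both Pythons mutate mat in place and
-- return it — the equivalence proved here is about the RETURN value only.

-- ===== PORT A =====
-- A's `type(mat[0])==tuple` branch is always false under this typing (rows are lists),
-- so only the else branch is ported. `mat[0]`/`mat[i]`/`mat[i][j]` are in range inside
-- Pre_ (mat nonempty, every row at least as long as row 0), so getD defaults are never hit.
def conjugada (mat : List (List (Int × Int))) : List (List (Int × Int)) :=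
  let ncols := (mat.headD []).length    -- len(mat[0]); Pre_ gives mat ≠ []
  (List.range mat.length).foldl (fun m i =>
    (List.range ncols).foldl (fun m' j =>
      let row := m'.getD i []
      let e := row.getD j (0, 0)
      m'.set i (row.set j (e.1, -e.2))) m) mat

-- ===== PORT B =====
-- _conj on a tuple
def conjElem (x : Int × Int) : Int × Int := (x.1, -x.2)
-- _conj on a list: replace every slot i by _conj(x[i])
def conjugada_alt (mat : List (List (Int × Int))) : List (List (Int × Int)) :=
  mat.map (fun row => row.map conjElem)

-- ===== PRECONDITION & SPEC =====
-- Pre_ excludes exactly the inputs on which A raises IndexError: the empty matrix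
-- (mat[0]) and ragged matrices with a row shorter than the first row (mat[i][j]).
def Pre_conjugada (mat : List (List (Int × Int))) : Prop :=
  mat ≠ [] ∧ ∀ row ∈ mat, (mat.headD []).length ≤ row.length
instance (mat : List (List (Int × Int))) : Decidable (Pre_conjugada mat) := by
  unfold Pre_conjugada; infer_instance
def pvWitness_conjugada : (List (List (Int × Int))) := [[(1, 2), (3, -4)], [(0, 5), (6, 7)]]

-- On ragged matrices whose first row is shortest, A leaves elements of longer rows beyond
-- column len(mat[0]) unconjugated (its inner loop is bounded by the first row's length),
-- while B conjugates every element — the intended conjugate of the whole matrix.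
def D_conjugada (mat : List (List (Int × Int))) : Prop :=
  ∃ row ∈ mat, ∃ p ∈ row.drop (mat.headD []).length, p.2 ≠ 0
instance (mat : List (List (Int × Int))) : Decidable (D_conjugada mat) := by
  unfold D_conjugada; infer_instance

def Spec_conjugada (mat : List (List (Int × Int))) (out : List (List (Int × Int))) : Prop :=
  ¬ D_conjugada mat → out = conjugada_alt mat
instance (mat : List (List (Int × Int))) (out : List (List (Int × Int))) : Decidable (Spec_conjugada mat out) := by unfold Spec_conjugada; infer_instance

def pvDiffWitness_conjugada : (List (List (Int × Int))) := [[(1, 2)], [(3, 4), (5, 6)]]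
def pvDiffWitnessOut_conjugada : (List (List (Int × Int))) × (List (List (Int × Int))) :=
  ([[(1, -2)], [(3, -4), (5, 6)]], [[(1, -2)], [(3, -4), (5, -6)]])

-- ===== CLAIM (what is proved, stated in full; the proofs are below) =====
def Claim_unchanged_conjugada : Prop := ∀ (mat : List (List (Int × Int))), Dom_conjugada mat → Pre_conjugada mat → Spec_conjugada mat (conjugada mat)
def Claim_changed_conjugada : Prop := Dom_conjugada (pvDiffWitness_conjugada) ∧ Pre_conjugada (pvDiffWitness_conjugada) ∧ D_conjugada (pvDiffWitness_conjugada) ∧ conjugada (pvDiffWitness_conjugada) = pvDiffWitnessOut_conjugada.1 ∧ conjugada_alt (pvDiffWitness_conjugada) = pvDiffWitnessOut_conjugada.2 ∧ pvDiffWitnessOut_conjugada.1 ≠ pvDiffWitnessOut_conjugada.2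
def Claim_exact_conjugada : Prop := ∀ (mat : List (List (Int × Int))), Dom_conjugada mat → Pre_conjugada mat → D_conjugada mat → conjugada mat ≠ conjugada_alt mat

-- ===== LEMMAS AND PROOFS =====

def conjTake (n : Nat) (r : List (Int × Int)) : List (Int × Int) :=
  (r.take n).map conjElem ++ r.drop n

lemma getD_set_self {α : Type} (m : List α) (i : Nat) (hi : i < m.length) (x d : α) :
    (m.set i x).getD i d = x := by
  rw [List.getD_eq_getElem _ _ (by simpa using hi)]
  simp

lemma conjTake_getD (n : Nat) (r : List (Int × Int)) :
    (conjTake n r).getD n (0,0) = r.getD n (0,0) := by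
  rcases Nat.lt_or_ge n r.length with h | h
  · have hlen : ((r.take n).map conjElem).length = n := by
      simp [Nat.min_eq_left (Nat.le_of_lt h)]
    rw [List.getD_eq_getElem _ _ (by simp [conjTake]; omega),
        List.getD_eq_getElem _ _ h]
    simp only [conjTake]
    rw [List.getElem_append_right (by omega)]
    simp only [hlen, List.getElem_drop]
    congr 1
    omega
  · have h3 : r.drop n = [] := List.drop_eq_nil_of_le h
    have h1 : r.take n = r := List.take_of_length_le h
    rw [List.getD_eq_default _ _ (by simp [conjTake, h1, h3]; omega),
        List.getD_eq_default _ _ (by omega)]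

lemma conjTake_succ (n : Nat) (r : List (Int × Int)) :
    conjTake (n + 1) r =
      (conjTake n r).set n (((r.getD n (0, 0)).1, -(r.getD n (0, 0)).2)) := by
  rcases Nat.lt_or_ge n r.length with h | h
  · have htl : r.drop n = r[n] :: r.drop (n + 1) := List.drop_eq_getElem_cons h
    have hlen : ((r.take n).map conjElem).length = n := by
      simp [Nat.min_eq_left (Nat.le_of_lt h)]
    simp only [conjTake, htl]
    rw [List.set_append_right _ _ (by omega)]
    rw [List.getD_eq_getElem _ _ h]
    have hmin : min n r.length = n := Nat.min_eq_left (Nat.le_of_lt h)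
    rw [hlen, Nat.sub_self, List.set_cons_zero]
    have hx : List.take (n+1) (List.map conjElem r) = List.take n (List.map conjElem r) ++ [conjElem r[n]] := by
      rw [List.take_add_one, List.getElem?_eq_getElem (by simpa using h)]
      simp
    rw [List.map_take, List.map_take, hx, List.append_assoc]
    simp [conjElem]
  · have h1 : r.take n = r := List.take_of_length_le h
    have h2 : r.take (n + 1) = r := List.take_of_length_le (by omega)
    have h3 : r.drop n = [] := List.drop_eq_nil_of_le h
    have h4 : r.drop (n + 1) = [] := List.drop_eq_nil_of_le (by omega)
    simp only [conjTake, h1, h2, h3, h4]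
    rw [List.set_eq_of_length_le (by simp; omega)]

lemma set_getD_self {α : Type} (m : List α) (i : Nat) (hi : i < m.length) (d : α) :
    m.set i (m.getD i d) = m := by
  rw [List.getD_eq_getElem _ _ hi, List.set_getElem_self]

lemma inner_fold (i : Nat) (m : List (List (Int × Int))) (hi : i < m.length) :
    ∀ k : Nat,
      (List.range k).foldl (fun m' j =>
        let row := m'.getD i []
        let e := row.getD j (0, 0)
        m'.set i (row.set j (e.1, -e.2))) m
      = m.set i (conjTake k (m.getD i [])) := by
  intro k
  induction k with
  | zero =>
    simp only [List.range_zero, List.foldl_nil, conjTake, List.take_zero, List.map_nil,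
      List.drop_zero, List.nil_append]
    exact (set_getD_self m i hi []).symm
  | succ k ih =>
    rw [List.range_succ, List.foldl_append, ih]
    simp only [List.foldl_cons, List.foldl_nil]
    rw [getD_set_self m i hi, List.set_set, conjTake_getD, conjTake_succ]

lemma outer_fold (n : Nat) :
    ∀ (k : Nat) (m : List (List (Int × Int))), k ≤ m.length →
      (List.range k).foldl (fun m' i =>
        (List.range n).foldl (fun m'' j =>
          let row := m''.getD i []
          let e := row.getD j (0, 0)
          m''.set i (row.set j (e.1, -e.2))) m') m
      = (m.take k).map (conjTake n) ++ m.drop k := by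
  intro k
  induction k with
  | zero => intro m _; simp
  | succ k ih =>
    intro m hk
    rw [List.range_succ, List.foldl_append, ih m (by omega)]
    simp only [List.foldl_cons, List.foldl_nil]
    have hklt : k < m.length := hk
    have hkm : k < ((m.take k).map (conjTake n) ++ m.drop k).length := by simp; omega
    rw [inner_fold k _ hkm n]
    have hlen : ((m.take k).map (conjTake n)).length = k := by
      simp [Nat.min_eq_left (Nat.le_of_lt hklt)]
    have hdrop : m.drop k = m[k] :: m.drop (k + 1) := List.drop_eq_getElem_cons hklt
    have hget : ((m.take k).map (conjTake n) ++ m.drop k).getD k [] = m[k] := by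
      rw [List.getD_eq_getElem _ _ hkm]
      rw [List.getElem_append_right (by omega)]
      simp only [hlen, hdrop, Nat.sub_self, List.getElem_cons_zero]
    rw [hget, hdrop, List.set_append_right _ _ (by omega), hlen, Nat.sub_self, List.set_cons_zero]
    have hx : List.take (k+1) (List.map (conjTake n) m) = List.take k (List.map (conjTake n) m) ++ [conjTake n m[k]] := by
      rw [List.take_add_one, List.getElem?_eq_getElem (by simpa using hklt)]
      simp
    rw [List.map_take, List.map_take, hx, List.append_assoc]
    simp

lemma conjugada_eq_mapConjTake (mat : List (List (Int × Int))) :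
    conjugada mat = mat.map (conjTake (mat.headD []).length) := by
  unfold conjugada
  rw [outer_fold _ mat.length mat (le_refl _)]
  simp

lemma conjTake_eq_map {n : Nat} {r : List (Int × Int)}
    (h : ∀ p ∈ r.drop n, p.2 = 0) : conjTake n r = r.map conjElem := by
  have hd : (r.drop n).map conjElem = r.drop n := by
    calc (r.drop n).map conjElem = (r.drop n).map id :=
          List.map_congr_left (fun p hp => by simp [conjElem, Prod.ext_iff, h p hp])
      _ = r.drop n := List.map_id _
  conv_lhs => rw [conjTake, ← hd]
  rw [← List.map_append, List.take_append_drop]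

-- ===== VERDICT (by name: the statement is the Claim_ definition above) =====
theorem conjugada_spec : Claim_unchanged_conjugada := by
  intro mat _ _ hnd
  rw [conjugada_eq_mapConjTake]
  unfold conjugada_alt
  apply List.map_congr_left
  intro row hrow
  apply conjTake_eq_map
  intro p hp
  by_contra hne
  exact hnd ⟨row, hrow, p, hp, hne⟩

theorem conjugada_changed : Claim_changed_conjugada := by
  unfold Claim_changed_conjugada; decide

theorem conjugada_tight : Claim_exact_conjugada := by
  intro mat _ hpre hd heq
  obtain ⟨row, hrow, p, hp, hp2⟩ := hd
  have hA := conjugada_eq_mapConjTake mat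
  have hmaps : mat.map (conjTake (mat.headD []).length) = mat.map (fun r => r.map conjElem) := by
    rw [← hA, heq]; rfl
  have hrows : conjTake (mat.headD []).length row = row.map conjElem :=
    (List.map_inj_left.mp hmaps) row hrow
  set n := (mat.headD []).length with hn
  obtain ⟨j, hj, hjeq⟩ := List.mem_iff_getElem.mp hp
  have hrowlen : n + j < row.length := by
    have := hj; rw [List.length_drop] at this; omega
  have hlen : ((row.take n).map conjElem).length = n := by
    simp [Nat.min_eq_left (by omega : n ≤ row.length)]
  have hL : (conjTake n row)[n + j]'(by simp [conjTake]; omega) = p := by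
    simp only [conjTake]
    rw [List.getElem_append_right (by omega)]
    simp only [hlen, Nat.add_sub_cancel_left]
    exact hjeq
  have hR : (row.map conjElem)[n + j]'(by simpa using hrowlen) = conjElem p := by
    rw [List.getElem_map]
    congr 1
    rw [← hjeq, List.getElem_drop]
  have hmid : (conjTake n row)[n + j]'(by simp [conjTake]; omega)
      = (row.map conjElem)[n + j]'(by simpa using hrowlen) :=
    List.getElem_of_eq hrows _
  have hPC : p = conjElem p := by rw [hL, hR] at hmid; exact hmid
  have h2 : p.2 = -p.2 := congrArg Prod.snd hPC
  omega
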